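-- pv_equiv track=rewrite | github.com/rangerdio/SoftUni | Fundamentals_with_Python/Pre/current/Mid Exams by Problem/Mid Problem 3/03. Moving Target.py | idx_validation
-- ===== SOURCE A (Python) =====
-- def idx_validation(data_list: list, index: int):
--     valid_list = []
--     for _ in range(len(data_list)):
--         valid_list.append(_)
--     if index in valid_list:
--         return True
--     else:
--         return False
-- ===== SOURCE B (Python) =====
-- def idx_validation(data_list: list, index: int):
--     return 0 <= index < len(data_list)
-- ===== Notes on version B (the rewrite author's own statement) =====
-- stated objective: faster
-- what changed: Replaces building a list of all indices and scanning it for membership with a direct O(1) bounds check 0 <= index < len(data_list).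
import Mathlib
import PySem

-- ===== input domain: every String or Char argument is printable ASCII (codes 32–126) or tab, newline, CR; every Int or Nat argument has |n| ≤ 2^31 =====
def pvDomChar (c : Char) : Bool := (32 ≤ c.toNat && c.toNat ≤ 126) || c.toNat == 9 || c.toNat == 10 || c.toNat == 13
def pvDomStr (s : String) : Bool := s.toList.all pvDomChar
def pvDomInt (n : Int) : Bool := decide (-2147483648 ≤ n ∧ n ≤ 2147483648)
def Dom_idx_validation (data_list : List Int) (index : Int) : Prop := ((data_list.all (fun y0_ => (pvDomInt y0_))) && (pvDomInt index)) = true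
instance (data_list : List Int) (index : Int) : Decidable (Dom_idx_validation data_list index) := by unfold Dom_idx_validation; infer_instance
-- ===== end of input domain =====

-- B replaces A's build-a-list-of-indices-and-scan with a direct O(1) bounds check.

-- ===== PORT A =====
-- valid_list = []; for _ in range(len(data_list)): valid_list.append(_); if index in valid_list: True else False
def idx_validation (data_list : List Int) (index : Int) : Bool :=
  let valid_list : List Int :=
    (PySem.List.pyRange 0 (data_list.length) 1).foldl (fun acc i => acc ++ [i]) []
  if valid_list.contains index then true else false

-- ===== PORT B =====
def idx_validation_alt (data_list : List Int) (index : Int) : Bool :=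
  decide (0 ≤ index ∧ index < (data_list.length : Int))

-- ===== PRECONDITION & SPEC =====
def Spec_idx_validation (data_list : List Int) (index : Int) (out : Bool) : Prop := out = idx_validation_alt data_list index
instance (data_list : List Int) (index : Int) (out : Bool) : Decidable (Spec_idx_validation data_list index out) := by unfold Spec_idx_validation; infer_instance

-- ===== CLAIM (what is proved, stated in full; the proofs are below) =====
def Claim_equal_idx_validation : Prop := ∀ (data_list : List Int) (index : Int), Dom_idx_validation data_list index → Spec_idx_validation data_list index (idx_validation data_list index)

-- ===== LEMMAS AND PROOFS =====

-- ===== VERDICT (by name: the statement is the Claim_ definition above) =====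
theorem idx_validation_spec : Claim_equal_idx_validation := by
  intro data_list index _
  unfold Spec_idx_validation idx_validation idx_validation_alt
  simp [PySem.List.mem_pyRange_one]
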